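-- pv_equiv track=rewrite | github.com/pangfumin/rp2040-modbus_example | readBME280.py | reg2string
-- ===== SOURCE A (Python) =====
-- def reg2string(my_list):
--     LSB = my_list[0] & 0xff
--     MSB = my_list[0] >> 8
--     if len(my_list)==0:
--        return ''
--     if LSB==0:
--         return ''
--     if MSB==0:
--         return  chr(LSB)
--     if len(my_list)==1:
--         return  chr(LSB) + chr(MSB)
--     return  chr(LSB) + chr(MSB) +  reg2string(my_list[1:])
-- ===== SOURCE B (Python) =====
-- def reg2string(my_list):
--     chars = []
--     for w in my_list:
--         lsb = w & 0xff
--         msb = w >> 8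
--         if lsb == 0:
--             break
--         chars.append(chr(lsb))
--         if msb == 0:
--             break
--         chars.append(chr(msb))
--     return ''.join(chars)
-- ===== Notes on version B (the rewrite author's own statement) =====
-- stated objective: simpler
-- what changed: Replaced A's self-recursion with repeated list slicing (my_list[1:]), string concatenation and four terminal special cases by a single iterative pass that accumulates chars in a list, breaks on a zero byte, and joins once at the end.
import Mathlib
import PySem

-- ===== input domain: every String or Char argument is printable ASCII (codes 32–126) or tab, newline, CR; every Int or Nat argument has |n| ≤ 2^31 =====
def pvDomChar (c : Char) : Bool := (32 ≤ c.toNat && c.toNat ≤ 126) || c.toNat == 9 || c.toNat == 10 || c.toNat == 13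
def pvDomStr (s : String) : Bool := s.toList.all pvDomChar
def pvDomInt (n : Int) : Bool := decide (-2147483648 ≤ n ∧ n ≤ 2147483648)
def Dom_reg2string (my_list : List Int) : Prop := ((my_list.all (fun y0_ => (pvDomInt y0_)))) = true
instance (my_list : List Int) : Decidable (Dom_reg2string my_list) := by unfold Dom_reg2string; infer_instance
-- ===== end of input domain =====

-- B is an iterative single-pass accumulator loop instead of A's recursion with repeated list slicing and string concatenation (objective: simpler/alternative; return-value equivalence on Pre_).

-- ===== PORT A =====
-- chr(k) is ported as Char.ofNat k.toNat: exact whenever 0 ≤ k ≤ 0x10FFFF and k is not a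
-- surrogate code point, which Pre_reg2string guarantees for every chr A reaches.
def reg2string (my_list : List Int) : String :=
  match my_list with
  | [] => ""   -- Python raises IndexError at my_list[0]; excluded by Pre_reg2string
  | w :: rest =>
    let LSB : Int := PySem.Int.band w 255
    let MSB : Int := w >>> (8 : Nat)
    if (w :: rest).length = 0 then ""
    else if LSB = 0 then ""
    else if MSB = 0 then String.ofList [Char.ofNat LSB.toNat]
    else if (w :: rest).length = 1 then String.ofList [Char.ofNat LSB.toNat, Char.ofNat MSB.toNat]
    else String.ofList [Char.ofNat LSB.toNat, Char.ofNat MSB.toNat] ++ reg2string rest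

-- ===== PORT B =====
def reg2stringLoop (ws : List Int) (chars : List Char) : String :=
  match ws with
  | [] => String.ofList chars                     -- ''.join(chars)
  | w :: rest =>
    let lsb : Int := PySem.Int.band w 255
    let msb : Int := w >>> (8 : Nat)
    if lsb = 0 then String.ofList chars           -- break
    else if msb = 0 then String.ofList (chars ++ [Char.ofNat lsb.toNat])   -- append; break
    else reg2stringLoop rest (chars ++ [Char.ofNat lsb.toNat, Char.ofNat msb.toNat])

def reg2string_alt (my_list : List Int) : String := reg2stringLoop my_list []

-- ===== PRECONDITION & SPEC =====
-- Pre_ excludes exactly (a) the empty list, where A raises IndexError, and (b) lists whose scanned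
-- prefix (elements before the first stop word, i.e. before LSB==0 or MSB==0) contains a word that is
-- negative or whose high byte exceeds 0x10FFFF — there Python's chr raises ValueError — or whose high
-- byte is a UTF-16 surrogate code point, where A returns a string that Lean's String cannot represent.
def Pre_reg2string (my_list : List Int) : Prop :=
  my_list ≠ [] ∧
  ∀ w ∈ my_list.takeWhile
      (fun w => decide (PySem.Int.band w 255 ≠ 0 ∧ w >>> (8 : Nat) ≠ 0)),
    0 ≤ w ∧ w < 285212672 ∧ ¬ (55296 ≤ w >>> (8 : Nat) ∧ w >>> (8 : Nat) ≤ 57343)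
instance (my_list : List Int) : Decidable (Pre_reg2string my_list) := by
  unfold Pre_reg2string; infer_instance

def pvWitness_reg2string : List Int := [16706, 67]

def Spec_reg2string (my_list : List Int) (out : String) : Prop := out = reg2string_alt my_list
instance (my_list : List Int) (out : String) : Decidable (Spec_reg2string my_list out) := by unfold Spec_reg2string; infer_instance

-- ===== CLAIM (what is proved, stated in full; the proofs are below) =====
def Claim_equal_reg2string : Prop := ∀ (my_list : List Int), Dom_reg2string my_list → Pre_reg2string my_list → Spec_reg2string my_list (reg2string my_list)

-- ===== LEMMAS AND PROOFS =====

-- The accumulator loop of B is A's recursion with the pending prefix made explicit.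
theorem reg2stringLoop_eq (ws : List Int) (chars : List Char) :
    reg2stringLoop ws chars = String.ofList (chars ++ (reg2string ws).toList) := by
  induction ws generalizing chars with
  | nil => simp [reg2stringLoop, reg2string]
  | cons w rest ih =>
    simp only [reg2stringLoop, reg2string]
    by_cases h2 : PySem.Int.band w 255 = 0
    · simp [h2]
    · by_cases h3 : w >>> (8 : Nat) = 0
      · simp [h2, h3]
      · cases rest with
        | nil => simp [h2, h3, reg2stringLoop]
        | cons x xs => simp [h2, h3, ih, List.append_assoc]

-- ===== VERDICT (by name: the statement is the Claim_ definition above) =====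
theorem reg2string_spec : Claim_equal_reg2string := by
  intro my_list _ _
  unfold Spec_reg2string reg2string_alt
  rw [reg2stringLoop_eq]
  simp [String.ofList_toList]
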